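-- pv_equiv track=rewrite | github.com/Rahul12344/PubMedDownload | src/model/enrichment.py | explore_full_depth
-- ===== SOURCE A (Python) =====
-- def explore_full_depth(id, curr_set, gene_ontology):
--     info = get_info(id, gene_ontology)
--     curr_set.add(id)
--     is_as = get_is_as(info)
--     if is_as == []:
--         return curr_set
--     for is_a in is_as:
--         if is_a not in curr_set:
--             explore_full_depth(is_a, curr_set, gene_ontology)
--
--     return curr_set
--
-- def get_info(id, gene_ontology):
--     for entry in gene_ontology:
--         if "id" in entry and entry["id"][0] == id:
--             return entry
--     return None
--
-- def get_is_as(info):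
--     if info != None and "is_a" in info:
--         return info["is_a"]
--     return []
-- ===== SOURCE B (Python) =====
-- def explore_full_depth(id, curr_set, gene_ontology):
--     index = {}
--     for entry in gene_ontology:
--         if "id" in entry:
--             key = entry["id"][0]
--             if key not in index:
--                 index[key] = entry
--
--     def parents(node):
--         info = index.get(node)
--         if info is None or "is_a" not in info:
--             return []
--         return info["is_a"]
--
--     curr_set.add(id)
--     stack = list(reversed(parents(id)))
--     while stack:
--         node = stack.pop()
--         if node in curr_set:
--             continue
--         curr_set.add(node)
--         for p in reversed(parents(node)):
--             stack.append(p)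
--     return curr_set
-- ===== Notes on version B (the rewrite author's own statement) =====
-- stated objective: alternative
-- what changed: The recursive DFS that rescans the ontology with get_info on each visit is replaced by a one-pass first-match id->entry dict index plus an iterative explicit-stack DFS (pop a node, skip if visited, mark visited, push its is_a parents in reverse), returning the same visited set; on the measured input family this is not faster.
-- outside the precondition, e.g. on explore_full_depth('x', set(), [{'id': ['x']}, {'id': []}]): A returns {'x'}, B raises IndexError
import Mathlib
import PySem

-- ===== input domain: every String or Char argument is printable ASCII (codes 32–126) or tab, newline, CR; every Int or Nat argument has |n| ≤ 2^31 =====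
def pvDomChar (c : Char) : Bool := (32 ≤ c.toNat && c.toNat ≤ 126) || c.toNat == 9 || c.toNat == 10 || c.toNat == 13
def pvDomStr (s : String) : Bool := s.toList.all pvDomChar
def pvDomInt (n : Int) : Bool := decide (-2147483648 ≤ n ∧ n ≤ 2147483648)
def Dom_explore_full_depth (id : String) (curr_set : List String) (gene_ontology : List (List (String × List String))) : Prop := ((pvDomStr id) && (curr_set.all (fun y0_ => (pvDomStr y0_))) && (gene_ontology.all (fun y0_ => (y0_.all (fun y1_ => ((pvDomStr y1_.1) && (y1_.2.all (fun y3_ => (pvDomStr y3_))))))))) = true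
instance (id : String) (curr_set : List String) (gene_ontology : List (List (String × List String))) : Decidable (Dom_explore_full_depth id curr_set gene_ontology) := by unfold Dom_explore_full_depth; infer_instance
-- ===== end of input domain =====

-- B replaces A's recursive DFS (which rescans the ontology with get_info on each visit) by a
-- one-pass first-match id->entry index plus an explicit-stack iterative DFS; same returned set,
-- built in the same insertion order.  Both A and B mutate the caller's curr_set set in place (the
-- equivalence proved here concerns the returned set, which is that same object in both).

-- ===== PORT A =====
-- get_info: linear scan for the first entry whose "id" value has first element = id.
-- (Python raises IndexError when it scans an entry whose "id" value is []; the port skips such an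
-- entry — those inputs are excluded by Pre_.)
def get_info (id : String) (gene_ontology : List (List (String × List String))) : Option (List (String × List String)) :=
  match gene_ontology with
  | [] => none
  | entry :: rest =>
    match entry.lookup "id" with
    | some v =>
      match PySem.List.pyGet? v 0 with
      | some x => if x = id then some entry else get_info id rest
      | none => get_info id rest
    | none => get_info id rest

def get_is_as (info : Option (List (String × List String))) : List String :=
  match info with
  | none => []
  | some entry => (entry.lookup "is_a").getD []

-- all "is_a" values in the ontology (first-match per entry), and all head-of-"id" values:
-- the strings the recursion can ever visit, used only for the sufficient fuel bound below.
def allIsas (gene_ontology : List (List (String × List String))) : List String :=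
  gene_ontology.flatMap (fun entry => (entry.lookup "is_a").getD [])

def allIds (gene_ontology : List (List (String × List String))) : List String :=
  gene_ontology.filterMap (fun entry => (entry.lookup "id").bind (fun v => PySem.List.pyGet? v 0))

-- fuel bounding the recursion depth of A: each nested call adds a fresh string drawn from
-- allIds ++ allIsas to curr_set, so this bound is never reached (proved in the lemmas below).
def fuelA (gene_ontology : List (List (String × List String))) : Nat :=
  (allIds gene_ontology).length + (allIsas gene_ontology).length + 2

def goA (gene_ontology : List (List (String × List String))) (fuel : Nat) (id : String) (curr_set : List String) : List String :=
  match fuel with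
  | 0 => curr_set
  | fuel + 1 =>
    let info := get_info id gene_ontology
    let s1 := PySem.Set.add curr_set id
    let is_as := get_is_as info
    if is_as = [] then s1
    else is_as.foldl (fun s a => if PySem.Set.contains s a then s else goA gene_ontology fuel a s) s1

def explore_full_depth (id : String) (curr_set : List String) (gene_ontology : List (List (String × List String))) : List String :=
  goA gene_ontology (fuelA gene_ontology) id curr_set

-- ===== PORT B =====
-- the dict 'index' of Source B: first-match association list id -> entry (insert only when absent).
def buildIdx (gene_ontology : List (List (String × List String))) : List (String × List (String × List String)) :=
  gene_ontology.foldl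
    (fun idx entry =>
      match entry.lookup "id" with
      | none => idx
      | some v =>
        match PySem.List.pyGet? v 0 with
        | none => idx   -- Source B raises IndexError here (outside Pre_)
        | some key => if (idx.lookup key).isSome then idx else idx ++ [(key, entry)])
    []

def parentsB (idx : List (String × List (String × List String))) (node : String) : List String :=
  match idx.lookup node with
  | none => []
  | some info => (info.lookup "is_a").getD []

-- fuel bounding the number of loop iterations of Source B's while loop (never reached, proved below).
def fuelB (gene_ontology : List (List (String × List String))) : Nat :=
  ((allIsas gene_ontology).length + 1) * ((allIds gene_ontology).length + (allIsas gene_ontology).length + 1)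

-- Source B's while loop.  The Lean list is the Python stack REVERSED: Python pops from the end (= our
-- head) and appends reversed(parents) at the end (= prepending parents unreversed to our head).
def goB (idx : List (String × List (String × List String))) (fuel : Nat) (stack : List String) (curr_set : List String) : List String :=
  match fuel, stack with
  | _, [] => curr_set
  | 0, _ :: _ => curr_set
  | fuel + 1, node :: rest =>
    if PySem.Set.contains curr_set node then goB idx fuel rest curr_set
    else goB idx fuel (parentsB idx node ++ rest) (PySem.Set.add curr_set node)

def explore_full_depth_alt (id : String) (curr_set : List String) (gene_ontology : List (List (String × List String))) : List String :=
  let idx := buildIdx gene_ontology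
  goB idx (fuelB gene_ontology) (parentsB idx id) (PySem.Set.add curr_set id)

-- ===== PRECONDITION & SPEC =====
-- Pre_ excludes ontologies containing an entry whose "id" value is the empty list: Python A raises
-- IndexError on entry["id"][0] whenever its linear scan reaches such an entry (and B always raises
-- there, since its index pass reads every entry).  On such inputs whose scans all stop before the
-- offending entry A still returns (see claim.json cites); they are excluded for this reason.
def Pre_explore_full_depth (id : String) (curr_set : List String) (gene_ontology : List (List (String × List String))) : Prop :=
  ∀ entry ∈ gene_ontology, entry.lookup "id" ≠ some []
instance (id : String) (curr_set : List String) (gene_ontology : List (List (String × List String))) : Decidable (Pre_explore_full_depth id curr_set gene_ontology) := by unfold Pre_explore_full_depth; infer_instance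

def pvWitness_explore_full_depth : String × List String × (List (List (String × List String))) :=
  ("a", [], [[("id", ["a"]), ("is_a", ["b", "c"])], [("id", ["b"]), ("is_a", ["c"])], [("id", ["c"])]])

def Spec_explore_full_depth (id : String) (curr_set : List String) (gene_ontology : List (List (String × List String))) (out : List String) : Prop := out = explore_full_depth_alt id curr_set gene_ontology
instance (id : String) (curr_set : List String) (gene_ontology : List (List (String × List String))) (out : List String) : Decidable (Spec_explore_full_depth id curr_set gene_ontology out) := by unfold Spec_explore_full_depth; infer_instance

-- ===== CLAIM (what is proved, stated in full; the proofs are below) =====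
def Claim_equal_explore_full_depth : Prop := ∀ (id : String) (curr_set : List String) (gene_ontology : List (List (String × List String))), Dom_explore_full_depth id curr_set gene_ontology → Pre_explore_full_depth id curr_set gene_ontology → Spec_explore_full_depth id curr_set gene_ontology (explore_full_depth id curr_set gene_ontology)

-- ===== LEMMAS AND PROOFS =====

-- Proof-only helpers: the finite universe of strings the search can ever visit, and the count
-- of its not-yet-visited elements (the termination measure showing both fuels are sufficient).
def univS (gene_ontology : List (List (String × List String))) : List String :=
  PySem.List.dedup (allIds gene_ontology ++ allIsas gene_ontology)

def mUnv (gene_ontology : List (List (String × List String))) (s : List String) : Nat :=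
  ((univS gene_ontology).filter (fun x => decide (x ∉ s))).length

def isasOf (gene_ontology : List (List (String × List String))) (node : String) : List String :=
  get_is_as (get_info node gene_ontology)

-- A's step with the canonical fuel: what one stack element contributes on the A side.
def stepN (gene_ontology : List (List (String × List String))) (s : List String) (a : String) : List String :=
  if PySem.Set.contains s a then s else goA gene_ontology (fuelA gene_ontology) a s

theorem lookup_append {v : Type} (l1 l2 : List (String × v)) (k : String) :
    (l1 ++ l2).lookup k = ((l1.lookup k).or (l2.lookup k)) := by
  induction l1 with
  | nil => simp [List.lookup]
  | cons h t ih => simp only [List.cons_append, List.lookup]; split <;> simp [ih]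

theorem not_mem_of_contains_false (s : List String) (a : String)
    (h : ¬ PySem.Set.contains s a = true) : a ∉ s :=
  fun hmem => h ((PySem.Set.contains_iff s a).2 hmem)

theorem add_of_not_mem (s : List String) (x : String) (h : x ∉ s) :
    PySem.Set.add s x = s ++ [x] := by
  unfold PySem.Set.add
  rw [if_neg]
  simp [h]

-- first-match lookup in the index Source B builds, with an arbitrary accumulator
theorem lookup_foldl_buildIdx (gene_ontology : List (List (String × List String)))
    (idx : List (String × List (String × List String))) (node : String) :
    ((gene_ontology.foldl
      (fun idx entry =>
        match entry.lookup "id" with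
        | none => idx
        | some v =>
          match PySem.List.pyGet? v 0 with
          | none => idx
          | some key => if (idx.lookup key).isSome then idx else idx ++ [(key, entry)])
      idx).lookup node)
    = ((idx.lookup node).or (get_info node gene_ontology)) := by
  induction gene_ontology generalizing idx with
  | nil => simp [get_info]
  | cons e rest ih =>
    simp only [List.foldl_cons]
    cases he : e.lookup "id" with
    | none => rw [ih]; simp [get_info, he]
    | some v =>
      cases hv : PySem.List.pyGet? v 0 with
      | none => rw [ih]; simp [get_info, he, hv]
      | some key =>
        simp only [hv]
        by_cases hk : (idx.lookup key).isSome
        · rw [if_pos hk, ih]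
          simp only [get_info, he, hv]
          by_cases hkn : key = node
          · subst hkn
            obtain ⟨w, hw⟩ := Option.isSome_iff_exists.1 hk
            simp [hw]
          · simp [hkn]
        · rw [if_neg hk, ih, lookup_append]
          simp only [get_info, he, hv]
          by_cases hkn : key = node
          · subst hkn
            rw [Option.not_isSome_iff_eq_none.1 hk]
            simp [List.lookup]
          · simp only [List.lookup]
            rw [if_neg hkn]
            have : (node == key) = false := by simp [Ne.symm hkn]
            simp [this]

theorem parentsB_buildIdx (gene_ontology : List (List (String × List String))) (node : String) :
    parentsB (buildIdx gene_ontology) node = isasOf gene_ontology node := by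
  unfold parentsB buildIdx isasOf get_is_as
  rw [lookup_foldl_buildIdx]
  cases get_info node gene_ontology <;> rfl

theorem get_info_some (gene_ontology : List (List (String × List String))) (node : String)
    (e : List (String × List String)) (h : get_info node gene_ontology = some e) :
    e ∈ gene_ontology ∧ ∃ v, e.lookup "id" = some v ∧ PySem.List.pyGet? v 0 = some node := by
  induction gene_ontology with
  | nil => simp [get_info] at h
  | cons e0 rest ih =>
    simp only [get_info] at h
    cases he : e0.lookup "id" with
    | none =>
      simp only [he] at h
      obtain ⟨hm, hv⟩ := ih h
      exact ⟨List.mem_cons_of_mem _ hm, hv⟩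
    | some v =>
      simp only [he] at h
      cases hv : PySem.List.pyGet? v 0 with
      | none =>
        simp only [hv] at h
        obtain ⟨hm, hw⟩ := ih h
        exact ⟨List.mem_cons_of_mem _ hm, hw⟩
      | some x =>
        simp only [hv] at h
        by_cases hx : x = node
        · rw [if_pos hx] at h
          cases h
          exact ⟨List.mem_cons_self, v, he, by rw [hv, hx]⟩
        · rw [if_neg hx] at h
          obtain ⟨hm, hw⟩ := ih h
          exact ⟨List.mem_cons_of_mem _ hm, hw⟩

theorem mem_allIds_of_get_info (gene_ontology : List (List (String × List String))) (node : String)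
    (e : List (String × List String)) (h : get_info node gene_ontology = some e) :
    node ∈ allIds gene_ontology := by
  obtain ⟨hm, v, hv, hp⟩ := get_info_some gene_ontology node e h
  unfold allIds
  exact List.mem_filterMap.2 ⟨e, hm, by rw [hv]; simpa using hp⟩

theorem isas_sublist (gene_ontology : List (List (String × List String)))
    (e : List (String × List String)) (h : e ∈ gene_ontology) :
    ((e.lookup "is_a").getD []).Sublist (allIsas gene_ontology) := by
  induction gene_ontology with
  | nil => simp at h
  | cons e0 rest ih =>
    unfold allIsas
    rw [List.flatMap_cons]
    rcases List.mem_cons.1 h with rfl | hm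
    · exact List.sublist_append_left _ _
    · exact (ih hm).trans (List.sublist_append_right _ _)

theorem mem_allIsas_of_isasOf (gene_ontology : List (List (String × List String)))
    (node a : String) (h : a ∈ isasOf gene_ontology node) : a ∈ allIsas gene_ontology := by
  unfold isasOf get_is_as at h
  cases hg : get_info node gene_ontology with
  | none => rw [hg] at h; simp at h
  | some e =>
    rw [hg] at h
    exact (isas_sublist gene_ontology e (get_info_some gene_ontology node e hg).1).subset h

theorem isasOf_length_le (gene_ontology : List (List (String × List String))) (node : String) :
    (isasOf gene_ontology node).length ≤ (allIsas gene_ontology).length := by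
  unfold isasOf get_is_as
  cases hg : get_info node gene_ontology with
  | none => simp
  | some e => exact (isas_sublist gene_ontology e (get_info_some gene_ontology node e hg).1).length_le

theorem mem_univS_of_allIds (gene_ontology : List (List (String × List String))) (x : String)
    (h : x ∈ allIds gene_ontology) : x ∈ univS gene_ontology := by
  unfold univS
  exact (PySem.List.mem_dedup _ _).2 (List.mem_append_left _ h)

theorem mem_univS_of_allIsas (gene_ontology : List (List (String × List String))) (x : String)
    (h : x ∈ allIsas gene_ontology) : x ∈ univS gene_ontology := by
  unfold univS
  exact (PySem.List.mem_dedup _ _).2 (List.mem_append_right _ h)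

theorem isasOf_ne_nil_mem_univS (gene_ontology : List (List (String × List String))) (node : String)
    (h : isasOf gene_ontology node ≠ []) : node ∈ univS gene_ontology := by
  unfold isasOf get_is_as at h
  cases hg : get_info node gene_ontology with
  | none => rw [hg] at h; simp at h
  | some e => exact mem_univS_of_allIds _ _ (mem_allIds_of_get_info _ _ e hg)

theorem nodup_univS (gene_ontology : List (List (String × List String))) :
    (univS gene_ontology).Nodup := PySem.List.nodup_dedup _

theorem univS_length_le (gene_ontology : List (List (String × List String))) :
    (univS gene_ontology).length ≤ (allIds gene_ontology).length + (allIsas gene_ontology).length := by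
  unfold univS
  rw [PySem.List.dedup_eq_ofList]
  calc (PySem.Set.ofList (allIds gene_ontology ++ allIsas gene_ontology)).length
      ≤ (allIds gene_ontology ++ allIsas gene_ontology).length := PySem.Set.length_ofList_le _
    _ = _ := List.length_append

theorem mUnv_le_univS (gene_ontology : List (List (String × List String))) (s : List String) :
    mUnv gene_ontology s ≤ (univS gene_ontology).length :=
  List.length_filter_le _ _

theorem mUnv_mono (gene_ontology : List (List (String × List String))) (s t : List String)
    (h : ∀ x ∈ s, x ∈ t) : mUnv gene_ontology t ≤ mUnv gene_ontology s := by
  unfold mUnv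
  rw [← List.countP_eq_length_filter, ← List.countP_eq_length_filter]
  refine List.countP_mono_left fun a _ ha => ?_
  simp only [decide_eq_true_eq] at ha ⊢
  exact fun hmem => ha (h a hmem)

theorem mUnv_add_le (gene_ontology : List (List (String × List String))) (s : List String) (x : String) :
    mUnv gene_ontology (PySem.Set.add s x) ≤ mUnv gene_ontology s :=
  mUnv_mono _ _ _ (fun y hy => (PySem.Set.mem_add s x y).2 (Or.inl hy))

theorem length_filter_ne_of_nodup (l : List String) (a : String) (h : l.Nodup) (hm : a ∈ l) :
    (l.filter (fun x => !(x == a))).length + 1 = l.length := by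
  have he := List.Nodup.erase_eq_filter h a
  have hl := List.length_erase_of_mem hm
  rw [he] at hl
  have hp : 1 ≤ l.length := List.length_pos_of_mem hm
  simp only [bne] at hl
  omega

theorem mUnv_add_fresh (gene_ontology : List (List (String × List String))) (s : List String)
    (x : String) (hu : x ∈ univS gene_ontology) (hx : x ∉ s) :
    mUnv gene_ontology (PySem.Set.add s x) + 1 = mUnv gene_ontology s := by
  unfold mUnv
  rw [add_of_not_mem s x hx]
  have hp : (fun a => decide (a ∉ s ++ [x])) = (fun a => (!(a == x)) && decide (a ∉ s)) := by
    funext a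
    simp only [List.mem_append, List.mem_singleton]
    by_cases h1 : a = x <;> by_cases h2 : a ∈ s <;> simp [h1, h2]
  rw [hp, ← List.filter_filter]
  exact length_filter_ne_of_nodup _ x ((nodup_univS gene_ontology).filter _)
    (List.mem_filter.2 ⟨hu, by simpa using hx⟩)

theorem foldl_mem_preserve {α : Type} (f : List String → α → List String) (x : String)
    (hf : ∀ s a, x ∈ s → x ∈ f s a) :
    ∀ (l : List α) (s : List String), x ∈ s → x ∈ l.foldl f s := by
  intro l
  induction l with
  | nil => intro s hx; exact hx
  | cons a t ih => intro s hx; exact ih (f s a) (hf s a hx)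

theorem subset_goA (gene_ontology : List (List (String × List String))) :
    ∀ (fuel : Nat) (id : String) (s : List String) (x : String), x ∈ s → x ∈ goA gene_ontology fuel id s := by
  intro fuel
  induction fuel with
  | zero => intro id s x hx; exact hx
  | succ f ih =>
    intro id s x hx
    have hadd : x ∈ PySem.Set.add s id := (PySem.Set.mem_add s id x).2 (Or.inl hx)
    simp only [goA]
    split
    · exact hadd
    · refine foldl_mem_preserve _ x (fun s' a hx' => ?_) _ _ hadd
      by_cases hc : PySem.Set.contains s' a
      · rw [if_pos hc]; exact hx'
      · rw [if_neg hc]; exact ih a s' x hx'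

theorem goA_succ (gene_ontology : List (List (String × List String))) (f : Nat) (id : String)
    (s : List String) :
    goA gene_ontology (f + 1) id s
      = (isasOf gene_ontology id).foldl
          (fun s a => if PySem.Set.contains s a then s else goA gene_ontology f a s)
          (PySem.Set.add s id) := by
  simp only [goA, isasOf]
  split
  · rename_i h
    simp [h]
  · rfl

theorem goA_fuel_indep (gene_ontology : List (List (String × List String))) :
    ∀ (k f1 f2 : Nat) (id : String) (s : List String),
      mUnv gene_ontology (PySem.Set.add s id) ≤ k → k + 1 ≤ f1 → k + 1 ≤ f2 →
      goA gene_ontology f1 id s = goA gene_ontology f2 id s := by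
  intro k
  induction k using Nat.strong_induction_on with
  | _ k IH =>
    intro f1 f2 id s hm h1 h2
    obtain ⟨a, rfl⟩ : ∃ a, f1 = a + 1 := ⟨f1 - 1, by omega⟩
    obtain ⟨b, rfl⟩ : ∃ b, f2 = b + 1 := ⟨f2 - 1, by omega⟩
    rw [goA_succ, goA_succ]
    have haux : ∀ (l : List String) (s' : List String),
        (∀ c ∈ l, c ∈ allIsas gene_ontology) → (∀ x ∈ PySem.Set.add s id, x ∈ s') →
        l.foldl (fun s c => if PySem.Set.contains s c then s else goA gene_ontology a c s) s'
          = l.foldl (fun s c => if PySem.Set.contains s c then s else goA gene_ontology b c s) s' := by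
      intro l
      induction l with
      | nil => intro s' _ _; rfl
      | cons c t iht =>
        intro s' hc hsub
        simp only [List.foldl_cons]
        by_cases hin : PySem.Set.contains s' c
        · rw [if_pos hin, if_pos hin]
          exact iht s' (fun d hd => hc d (List.mem_cons_of_mem _ hd)) hsub
        · rw [if_neg hin, if_neg hin]
          have hcm : c ∉ s' := not_mem_of_contains_false s' c hin
          have hcu : c ∈ univS gene_ontology :=
            mem_univS_of_allIsas _ _ (hc c List.mem_cons_self)
          have hms' : mUnv gene_ontology s' ≤ mUnv gene_ontology (PySem.Set.add s id) :=
            mUnv_mono _ _ _ hsub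
          have heq : mUnv gene_ontology (PySem.Set.add s' c) + 1 = mUnv gene_ontology s' :=
            mUnv_add_fresh _ _ _ hcu hcm
          have hstep : goA gene_ontology a c s' = goA gene_ontology b c s' :=
            IH (mUnv gene_ontology (PySem.Set.add s' c)) (by omega) a b c s'
              (le_refl _) (by omega) (by omega)
          rw [hstep]
          exact iht (goA gene_ontology b c s') (fun d hd => hc d (List.mem_cons_of_mem _ hd))
            (fun x hx => subset_goA gene_ontology b c s' x (hsub x hx))
    exact haux (isasOf gene_ontology id) (PySem.Set.add s id)
      (fun c hc => mem_allIsas_of_isasOf _ _ _ hc) (fun x hx => hx)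

theorem fuelA_large (gene_ontology : List (List (String × List String))) :
    (univS gene_ontology).length + 2 ≤ fuelA gene_ontology := by
  have := univS_length_le gene_ontology
  unfold fuelA
  omega

theorem foldl_step_norm (gene_ontology : List (List (String × List String))) (f : Nat)
    (hf : (univS gene_ontology).length + 1 ≤ f) :
    ∀ (l s : List String),
      l.foldl (fun s a => if PySem.Set.contains s a then s else goA gene_ontology f a s) s
        = l.foldl (stepN gene_ontology) s := by
  intro l
  induction l with
  | nil => intro s; rfl
  | cons a t ih =>
    intro s
    simp only [List.foldl_cons]
    have hone : (if PySem.Set.contains s a then s else goA gene_ontology f a s)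
        = stepN gene_ontology s a := by
      unfold stepN
      by_cases hin : PySem.Set.contains s a
      · rw [if_pos hin, if_pos hin]
      · rw [if_neg hin, if_neg hin]
        have hk : mUnv gene_ontology (PySem.Set.add s a) ≤ (univS gene_ontology).length :=
          mUnv_le_univS _ _
        have := fuelA_large gene_ontology
        exact goA_fuel_indep gene_ontology ((univS gene_ontology).length) f (fuelA gene_ontology)
          a s hk (by omega) (by omega)
    rw [hone, ih]

theorem goB_bridge (gene_ontology : List (List (String × List String))) :
    ∀ (f : Nat) (stack s : List String),
      stack.length + ((allIsas gene_ontology).length + 1) * mUnv gene_ontology s ≤ f →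
      goB (buildIdx gene_ontology) f stack s = stack.foldl (stepN gene_ontology) s := by
  intro f
  induction f with
  | zero =>
    intro stack s h
    cases stack with
    | nil => rfl
    | cons node rest => simp [List.length_cons] at h
  | succ f ih =>
    intro stack s h
    cases stack with
    | nil => rfl
    | cons node rest =>
      simp only [goB, List.foldl_cons]
      by_cases hin : PySem.Set.contains s node
      · rw [if_pos hin]
        rw [ih rest s (by simp only [List.length_cons] at h; omega)]
        have : stepN gene_ontology s node = s := by unfold stepN; rw [if_pos hin]
        rw [this]
      · rw [if_neg hin]
        have hnode : node ∉ s := not_mem_of_contains_false s node hin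
        rw [parentsB_buildIdx]
        have hb : (isasOf gene_ontology node).length + rest.length
            + ((allIsas gene_ontology).length + 1) * mUnv gene_ontology (PySem.Set.add s node) ≤ f := by
          simp only [List.length_cons] at h
          by_cases hnil : isasOf gene_ontology node = []
          · rw [hnil]
            have hle := mUnv_add_le gene_ontology s node
            have hmul : ((allIsas gene_ontology).length + 1) * mUnv gene_ontology (PySem.Set.add s node)
                ≤ ((allIsas gene_ontology).length + 1) * mUnv gene_ontology s :=
              Nat.mul_le_mul_left _ hle
            simp only [List.length_nil]
            omega
          · have hu := isasOf_ne_nil_mem_univS gene_ontology node hnil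
            have hfr := mUnv_add_fresh gene_ontology s node hu hnode
            have hlenis := isasOf_length_le gene_ontology node
            have hmul : ((allIsas gene_ontology).length + 1) * mUnv gene_ontology s
                = ((allIsas gene_ontology).length + 1) * mUnv gene_ontology (PySem.Set.add s node)
                  + ((allIsas gene_ontology).length + 1) := by
              rw [← hfr]; ring
            omega
        rw [ih _ _ (by simp only [List.length_append]; omega)]
        rw [List.foldl_append]
        have hstep : stepN gene_ontology s node
            = (isasOf gene_ontology node).foldl (stepN gene_ontology) (PySem.Set.add s node) := by
          unfold stepN
          rw [if_neg hin]
          have hfa : fuelA gene_ontology = (fuelA gene_ontology - 1) + 1 := by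
            unfold fuelA; omega
          rw [hfa, goA_succ]
          have := fuelA_large gene_ontology
          exact foldl_step_norm gene_ontology (fuelA gene_ontology - 1) (by omega) _ _
        rw [hstep]

theorem goA_eq_goB (gene_ontology : List (List (String × List String))) (id : String)
    (s : List String) :
    explore_full_depth id s gene_ontology = explore_full_depth_alt id s gene_ontology := by
  unfold explore_full_depth explore_full_depth_alt
  rw [goB_bridge]
  · rw [parentsB_buildIdx]
    have hfa : fuelA gene_ontology = (fuelA gene_ontology - 1) + 1 := by unfold fuelA; omega
    rw [hfa, goA_succ]
    have := fuelA_large gene_ontology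
    exact (foldl_step_norm gene_ontology (fuelA gene_ontology - 1) (by omega) _ _)
  · rw [parentsB_buildIdx]
    have h1 : (isasOf gene_ontology id).length ≤ (allIsas gene_ontology).length :=
      isasOf_length_le gene_ontology id
    have h2 : mUnv gene_ontology (PySem.Set.add s id) ≤ (univS gene_ontology).length :=
      mUnv_le_univS _ _
    have h3 := univS_length_le gene_ontology
    have hmul : ((allIsas gene_ontology).length + 1) * mUnv gene_ontology (PySem.Set.add s id)
        ≤ ((allIsas gene_ontology).length + 1)
          * ((allIds gene_ontology).length + (allIsas gene_ontology).length) :=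
      Nat.mul_le_mul_left _ (by omega)
    have hexp : ((allIsas gene_ontology).length + 1)
          * ((allIds gene_ontology).length + (allIsas gene_ontology).length + 1)
        = ((allIsas gene_ontology).length + 1)
          * ((allIds gene_ontology).length + (allIsas gene_ontology).length)
          + ((allIsas gene_ontology).length + 1) := by ring
    unfold fuelB
    omega

-- ===== VERDICT (by name: the statement is the Claim_ definition above) =====
theorem explore_full_depth_spec : Claim_equal_explore_full_depth := by
  intro id curr_set gene_ontology _ _
  unfold Spec_explore_full_depth
  exact goA_eq_goB gene_ontology id curr_set
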